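-- pv_equiv track=rewrite | github.com/wwong-bc/BOJ | 프로그래머스/3/12987. 숫자 게임/숫자 게임.py | solution
-- ===== SOURCE A (Python) =====
-- def solution(A, B):
--     A.sort(reverse=True)
--     B.sort(reverse=True)
--     win = 0
--     for b in B:
--         for a in A:
--             if a < b:
--                 win += 1
--                 A.pop(A.index(a))
--                 break
--     return win
-- ===== SOURCE B (Python) =====
-- def solution(A, B):
--     # Two-pointer greedy over both lists sorted descending (O(n log n)).
--     # Same in-place sort side effect on A and B as the original.
--     A.sort(reverse=True)
--     B.sort(reverse=True)
--     win = 0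
--     i = 0
--     for b in B:
--         while i < len(A) and A[i] >= b:
--             i += 1
--         if i == len(A):
--             break
--         win += 1
--         i += 1
--     return win
-- ===== Notes on version B (the rewrite author's own statement) =====
-- stated objective: faster
-- what changed: Replaces the inner linear scan plus list.index/pop of the O(n^2) greedy with a single forward pointer over A sorted descending (two-pointer greedy), removing all list mutation scans.
import Mathlib
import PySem

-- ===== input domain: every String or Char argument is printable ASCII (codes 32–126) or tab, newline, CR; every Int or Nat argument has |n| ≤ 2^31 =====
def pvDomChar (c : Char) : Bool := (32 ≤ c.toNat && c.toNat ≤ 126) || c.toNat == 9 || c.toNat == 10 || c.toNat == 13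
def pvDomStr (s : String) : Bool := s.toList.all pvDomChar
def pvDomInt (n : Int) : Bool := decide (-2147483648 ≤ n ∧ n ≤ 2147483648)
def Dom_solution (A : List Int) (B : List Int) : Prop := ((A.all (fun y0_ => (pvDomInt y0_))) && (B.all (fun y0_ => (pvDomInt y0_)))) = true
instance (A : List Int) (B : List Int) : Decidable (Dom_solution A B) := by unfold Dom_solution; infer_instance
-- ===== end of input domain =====

-- B replaces A's quadratic scan-and-pop greedy with a two-pointer greedy over A
-- sorted descending (objective: faster, asymptotic). Equivalence is about the
-- RETURN value only; both Pythons sort A and B in place the same way.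

-- ===== PORT A =====
-- inner 'for a in A: if a < b: … break': first element of the list that is < b
def pvFindA (b : Int) : List Int → Option Int
  | [] => none
  | a :: rest => if a < b then some a else pvFindA b rest

-- outer 'for b in B' loop, carrying the mutated list A and the win counter;
-- the 'none' fallbacks for index?/pop? are unreachable (the found a is in As)
def pvLoopA : List Int → List Int → Int → Int
  | _, [], win => win
  | As, b :: bs, win =>
    match pvFindA b As with
    | none => pvLoopA As bs win
    | some a =>
      let As' :=
        match PySem.List.index? As a with
        | none => As
        | some j =>
          match PySem.List.pop? As (j : Int) with
          | none => As
          | some r => r.2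
      pvLoopA As' bs (win + 1)

def solution (A : List Int) (B : List Int) : Int :=
  pvLoopA (PySem.List.sorted A (fun x => x) true) (PySem.List.sorted B (fun x => x) true) 0

-- ===== PORT B =====
-- two-pointer pass: skip (drop) the a's with a ≥ b, then match the next a;
-- if the pointer ran off the end, no later (smaller) b can win either
def pvGoAlt : List Int → List Int → Int
  | _, [] => 0
  | As, b :: bs =>
    match As.dropWhile (fun a => decide (b ≤ a)) with
    | [] => 0
    | _ :: rest => 1 + pvGoAlt rest bs

def solution_alt (A : List Int) (B : List Int) : Int :=
  pvGoAlt (PySem.List.sorted A (fun x => x) true) (PySem.List.sorted B (fun x => x) true)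

-- ===== PRECONDITION & SPEC =====
def Spec_solution (A : List Int) (B : List Int) (out : Int) : Prop := out = solution_alt A B
instance (A : List Int) (B : List Int) (out : Int) : Decidable (Spec_solution A B out) := by unfold Spec_solution; infer_instance

-- ===== CLAIM (what is proved, stated in full; the proofs are below) =====
def Claim_equal_solution : Prop := ∀ (A : List Int) (B : List Int), Dom_solution A B → Spec_solution A B (solution A B)

-- ===== LEMMAS AND PROOFS =====

theorem pvGoAlt_nil (bs : List Int) : pvGoAlt [] bs = 0 := by
  cases bs <;> simp [pvGoAlt]

theorem pvFindA_none {b : Int} {l : List Int} (h : ∀ x ∈ l, ¬ x < b) :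
    pvFindA b l = none := by
  induction l with
  | nil => rfl
  | cons x xs ih =>
    simp only [pvFindA]
    rw [if_neg (h x (by simp))]
    exact ih fun y hy => h y (by simp [hy])

theorem pvFindA_append_none {b : Int} {l t : List Int} (h : ∀ x ∈ l, ¬ x < b) :
    pvFindA b (l ++ t) = pvFindA b t := by
  induction l with
  | nil => rfl
  | cons x xs ih =>
    simp only [List.cons_append, pvFindA]
    rw [if_neg (h x (by simp))]
    exact ih fun y hy => h y (by simp [hy])

theorem pvIndex_prefix {a : Int} {l r : List Int} (h : ∀ x ∈ l, x ≠ a) :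
    PySem.List.index? (l ++ a :: r) a = some l.length := by
  induction l with
  | nil =>
    simp only [List.nil_append, List.length_nil]
    exact PySem.List.index?_cons_self a r
  | cons x xs ih =>
    rw [List.cons_append, PySem.List.index?_cons_of_ne _ (h x (by simp)),
      ih fun y hy => h y (by simp [hy])]
    simp

theorem pvPop_at {a : Int} (l r : List Int) :
    PySem.List.pop? (l ++ a :: r) ((l.length : Nat) : Int) = some (a, l ++ r) := by
  have hlen : l.length < (l ++ a :: r).length := by simp
  rw [PySem.List.pop?_natCast _ _ hlen]
  congr 1
  refine Prod.ext ?_ ?_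
  · simp
  · simp [List.eraseIdx_append_of_length_le (le_refl l.length)]

theorem dropWhile_head_false {p : Int → Bool} {l : List Int} {a : Int} {r : List Int}
    (h : l.dropWhile p = a :: r) : p a = false := by
  induction l with
  | nil => simp at h
  | cons x xs ih =>
    by_cases hx : p x
    · rw [List.dropWhile_cons_of_pos hx] at h; exact ih h
    · rw [List.dropWhile_cons_of_neg hx] at h
      cases h; simpa using hx

theorem pvKey : ∀ (bs pre suf : List Int) (w : Int),
    bs.Pairwise (fun a b => b ≤ a) →
    (∀ x ∈ pre, ∀ b ∈ bs, b ≤ x) →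
    pvLoopA (pre ++ suf) bs w = w + pvGoAlt suf bs := by
  intro bs
  induction bs with
  | nil => intro pre suf w _ _; simp [pvLoopA, pvGoAlt]
  | cons b bs ih =>
    intro pre suf w hp hpre
    have hble : ∀ b' ∈ bs, b' ≤ b := by
      intro b' hb'; exact (List.pairwise_cons.mp hp).1 b' hb'
    have hptail : bs.Pairwise (fun a b => b ≤ a) := (List.pairwise_cons.mp hp).2
    have hpreb : ∀ x ∈ pre, b ≤ x := fun x hx => hpre x hx b (by simp)
    have hsplit := List.takeWhile_append_dropWhile (p := fun a => decide (b ≤ a)) (l := suf)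
    set t := suf.takeWhile (fun a => decide (b ≤ a)) with ht
    set d := suf.dropWhile (fun a => decide (b ≤ a)) with hd
    have htge : ∀ x ∈ t, b ≤ x := by
      intro x hx
      have := List.mem_takeWhile_imp hx
      simpa using this
    cases hdd : d with
    | nil =>
      -- no element of pre ++ suf is < b: skip this b
      have hallge : ∀ x ∈ pre ++ suf, b ≤ x := by
        intro x hx
        rcases List.mem_append.mp hx with h | h
        · exact hpreb x h
        · rw [← hsplit] at h
          rcases List.mem_append.mp h with h | h
          · exact htge x h
          · rw [hdd] at h; simp at h
      have hfind : pvFindA b (pre ++ suf) = none :=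
        pvFindA_none fun x hx => not_lt.mpr (hallge x hx)
      have : pvLoopA (pre ++ suf) (b :: bs) w = pvLoopA ((pre ++ suf) ++ []) bs w := by
        simp [pvLoopA, hfind]
      rw [this, ih (pre ++ suf) [] w hptail
        (fun x hx b' hb' => le_trans (hble b' hb') (hallge x hx))]
      simp [pvGoAlt, ← hd, hdd, pvGoAlt_nil]
    | cons a rest =>
      have hab : a < b := by
        have := dropWhile_head_false (hd ▸ hdd)
        simpa using this
      have hprefge : ∀ x ∈ pre ++ t, b ≤ x := by
        intro x hx
        rcases List.mem_append.mp hx with h | h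
        · exact hpreb x h
        · exact htge x h
      have hshape : pre ++ suf = (pre ++ t) ++ a :: rest := by
        rw [← hsplit, hdd]; simp
      have hfind : pvFindA b (pre ++ suf) = some a := by
        rw [hshape, pvFindA_append_none
          (fun x hx => not_lt.mpr (hprefge x hx))]
        simp [pvFindA, hab]
      have hidx : PySem.List.index? (pre ++ suf) a = some (pre ++ t).length := by
        rw [hshape]
        exact pvIndex_prefix fun x hx => ne_of_gt (lt_of_lt_of_le hab (hprefge x hx))
      have hpop : PySem.List.pop? (pre ++ suf) (((pre ++ t).length : Nat) : Int)
          = some (a, (pre ++ t) ++ rest) := by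
        rw [hshape]; exact pvPop_at _ _
      have hstep : pvLoopA (pre ++ suf) (b :: bs) w
          = pvLoopA ((pre ++ t) ++ rest) bs (w + 1) := by
        simp only [pvLoopA, hfind, hidx, hpop]
      rw [hstep, ih (pre ++ t) rest (w + 1) hptail
        (fun x hx b' hb' => le_trans (hble b' hb') (hprefge x hx))]
      have : pvGoAlt suf (b :: bs) = 1 + pvGoAlt rest bs := by
        simp [pvGoAlt, ← hd, hdd]
      rw [this]; ring

-- ===== VERDICT (by name: the statement is the Claim_ definition above) =====
theorem solution_spec : Claim_equal_solution := by
  intro A B _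
  unfold Spec_solution solution solution_alt
  have hp : (PySem.List.sorted B (fun x => x) true).Pairwise (fun a b => b ≤ a) :=
    PySem.List.sorted_pairwise_rev B (fun x => x)
  have := pvKey (PySem.List.sorted B (fun x => x) true) []
    (PySem.List.sorted A (fun x => x) true) 0 hp (by simp)
  simpa using this
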